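-- pv_equiv track=rewrite | github.com/mainak-cmd/NEW_ica | cogquest.py | naming_test
-- ===== SOURCE A (Python) =====
-- def naming_test(answer_new):
--     value = [string.lower() for string in answer_new]
--     list_1=[]
--     list_2=[]
--     list_3=[]
--     j = 0
--     result_dict={}
--     text = ["lion", "camel", ["rhinoceros", "rhino"]]
--
--     for index, i in enumerate(value):
--         if isinstance(text[index], list):
--             if i in text[index]:
--                 list_1.append(i)
--                 list_2.append(index)
--             else:
--                 list_3.append("not in list")
--         else:
--             if i == text[index]:
--                 list_1.append(i)
--                 list_2.append(index)
--             else: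
--                 list_3.append("not in list")
--     try:
--         for i in range(len(list_2)):
--             result_dict[list_2[i]] = list_1[i]
--         for i in result_dict.keys():
--             if isinstance(text[i], list):
--                 if value[i] in text[i]:
--                     j += 1
--             elif value[i] == text[i]:
--                 j += 1
--         score_3 = j
--         return score_3
--     except TypeError:
--         return 0
-- ===== SOURCE B (Python) =====
-- def naming_test(answer_new):
--     text = ["lion", "camel", ["rhinoceros", "rhino"]]
--     count = 0
--     for index, ans in enumerate(answer_new):
--         ref = text[index]
--         a = ans.lower()
--         if a in ref if isinstance(ref, list) else a == ref:
--             count += 1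
--     return count
-- ===== Notes on version B (the rewrite author's own statement) =====
-- stated objective: simpler
-- what changed: Single pass over enumerate(answer_new) incrementing a counter on each match, dropping A's three intermediate lists, the index->answer dict, the recheck loop over the dict keys and the dead try/except TypeError.
import Mathlib
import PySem

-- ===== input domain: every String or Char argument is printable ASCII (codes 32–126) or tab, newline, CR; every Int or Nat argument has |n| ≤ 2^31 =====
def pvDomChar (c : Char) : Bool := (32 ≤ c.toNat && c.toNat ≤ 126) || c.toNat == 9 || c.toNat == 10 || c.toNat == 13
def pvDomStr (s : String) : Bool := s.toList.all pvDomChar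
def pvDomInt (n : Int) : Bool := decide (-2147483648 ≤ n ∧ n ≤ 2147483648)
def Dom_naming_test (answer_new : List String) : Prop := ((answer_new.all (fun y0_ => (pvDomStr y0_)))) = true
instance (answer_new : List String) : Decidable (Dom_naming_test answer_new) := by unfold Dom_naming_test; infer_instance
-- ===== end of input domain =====

set_option maxHeartbeats 1000000


-- B is a single counting pass over enumerate(answer_new); A's dead scaffolding (three lists,
-- a dict, a recheck loop, try/except TypeError) is dropped.  Objective: simpler.

-- ===== PORT A =====
-- text = ["lion", "camel", ["rhinoceros", "rhino"]]; text[index] is a list exactly at index 2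
-- (index > 2 would be an IndexError in Python — excluded by Pre_naming_test).
def pvTextStr (index : Int) : String := if index = 0 then "lion" else "camel"

-- first loop of A: builds (list_1, list_2, list_3) over enumerate(value)
def pvLoop1 (st : List String × List Int × List String) (p : Int × String) :
    List String × List Int × List String :=
  let (l1, l2, l3) := st
  let (index, i) := p
  if index = 2 then
    if i = "rhinoceros" ∨ i = "rhino" then (l1 ++ [i], l2 ++ [index], l3)
    else (l1, l2, l3 ++ ["not in list"])
  else
    if i = pvTextStr index then (l1 ++ [i], l2 ++ [index], l3)
    else (l1, l2, l3 ++ ["not in list"])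

def naming_test (answer_new : List String) : Int :=
  let value := answer_new.map PySem.Str.lower
  let st := (PySem.List.enumerate value).foldl pvLoop1 ([], [], [])
  let list_1 := st.1
  let list_2 := st.2.1
  -- result_dict[list_2[i]] = list_1[i]  for i in range(len(list_2))
  let result_dict : PySem.Dict Int String :=
    (PySem.List.pyRange 0 (list_2.length : Int) 1).foldl
      (fun d i => d.insert (PySem.List.pyGetD list_2 i 0) (PySem.List.pyGetD list_1 i ""))
      (PySem.Dict.empty)
  -- second loop: for i in result_dict.keys(): recheck the match and bump j
  let j := (result_dict.keys).foldl
    (fun j i =>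
      if i = 2 then
        if PySem.List.pyGetD value i "" = "rhinoceros" ∨ PySem.List.pyGetD value i "" = "rhino"
        then j + 1 else j
      else
        if PySem.List.pyGetD value i "" = pvTextStr i then j + 1 else j)
    (0 : Int)
  j

-- ===== PORT B =====
def pvRefMatch (index : Int) (a : String) : Bool :=
  if index = 2 then decide (a = "rhinoceros" ∨ a = "rhino")
  else decide (a = (if index = 0 then "lion" else "camel"))

def naming_test_alt (answer_new : List String) : Int :=
  (PySem.List.enumerate answer_new).foldl
    (fun count p => if pvRefMatch p.1 (PySem.Str.lower p.2) then count + 1 else count)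
    (0 : Int)

-- ===== PRECONDITION & SPEC =====
-- Pre_ excludes lists of more than 3 entries, on which A raises IndexError at text[index].
def Pre_naming_test (answer_new : List String) : Prop := answer_new.length ≤ 3
instance (answer_new : List String) : Decidable (Pre_naming_test answer_new) := by unfold Pre_naming_test; infer_instance
def pvWitness_naming_test : List String := ["lion", "Camel", "rhino"]

def Spec_naming_test (answer_new : List String) (out : Int) : Prop := out = naming_test_alt answer_new
instance (answer_new : List String) (out : Int) : Decidable (Spec_naming_test answer_new out) := by unfold Spec_naming_test; infer_instance

-- ===== CLAIM (what is proved, stated in full; the proofs are below) =====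
def Claim_equal_naming_test : Prop := ∀ (answer_new : List String), Dom_naming_test answer_new → Pre_naming_test answer_new → Spec_naming_test answer_new (naming_test answer_new)

-- ===== LEMMAS AND PROOFS =====

-- ===== VERDICT (by name: the statement is the Claim_ definition above) =====
theorem naming_test_spec : Claim_equal_naming_test := by
  intro answer_new _ hpre
  unfold Spec_naming_test
  match answer_new, hpre with
  | [], _ => decide
  | [a], _ =>
      simp [naming_test, naming_test_alt, pvLoop1, pvRefMatch, pvTextStr,
        PySem.List.enumerate]
      split_ifs <;>
        simp_all [PySem.List.pyRange_one, List.range_succ, PySem.List.pyGetD_ofNat',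
          PySem.Dict.insert, PySem.Dict.keys, PySem.Dict.contains, PySem.Dict.empty]
  | [a, b], _ =>
      simp [naming_test, naming_test_alt, pvLoop1, pvRefMatch, pvTextStr,
        PySem.List.enumerate]
      split_ifs <;>
        simp_all [PySem.List.pyRange_one, List.range_succ, PySem.List.pyGetD_ofNat',
          PySem.Dict.insert, PySem.Dict.keys, PySem.Dict.contains, PySem.Dict.empty]
  | [a, b, c], _ =>
      simp [naming_test, naming_test_alt, pvLoop1, pvRefMatch, pvTextStr,
        PySem.List.enumerate]
      split_ifs <;>
        simp_all [PySem.List.pyRange_one, List.range_succ, PySem.List.pyGetD_ofNat',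
          PySem.Dict.insert, PySem.Dict.keys, PySem.Dict.contains, PySem.Dict.empty]
  | _ :: _ :: _ :: _ :: _, h => simp [Pre_naming_test] at h; omega
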